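-- pv_equiv track=rewrite | github.com/tiagodusilva/FEUP-FPRO | FPRO_Play/6. Strings/minion_fontasso.py | minion
-- ===== SOURCE A (Python) =====
-- def is_vowel(letter):
--     vowels = ['a', 'e', 'i', 'o', 'u']
--     return letter.lower() in vowels
--
-- def minion(astring):
--     #Stuart(vogais)
--     stuart_substrings = []
--     kevin_substrings = []
--
--     for i in range(0, len(astring)):
--         if is_vowel(astring[i]):
--             for j in range(i, len(astring)):
--                 stuart_substrings.append(astring[i:j + 1])
--         else:
--             for k in range(i, len(astring)):
--                 kevin_substrings.append(astring[i:k + 1])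
--
--     if len(stuart_substrings) > len(kevin_substrings):
--         result = stuart_substrings
--         winner = "Kevin"
--     elif len(stuart_substrings) < len(kevin_substrings):
--         result = kevin_substrings
--         winner = "Stuart"
--     else:
--         return "It was a draw!"
--
--     out = "The winner was {0} with a total of {1} points:\n".format(winner, len(result))
--     for i in list(sorted(set(result), key=lambda x: (len(x), x))):
--         out += "- {0}: {1}\n".format(i, result.count(i))
--
--     return out
-- ===== SOURCE B (Python) =====
-- def minion(astring):
--     n = len(astring)
--     vowels = 'aeiou'
--     # score each team arithmetically: index i contributes n - i substrings
--     stuart = sum(n - i for i in range(n) if astring[i].lower() in vowels)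
--     kevin = n * (n + 1) // 2 - stuart
--     if stuart == kevin:
--         return "It was a draw!"
--     if stuart > kevin:
--         winner, take_vowel, score = "Kevin", True, stuart
--     else:
--         winner, take_vowel, score = "Stuart", False, kevin
--     # count only the winning team's substrings, never materialising the loser's
--     counts = {}
--     for i in range(n):
--         if (astring[i].lower() in vowels) == take_vowel:
--             for j in range(i, n):
--                 s = astring[i:j + 1]
--                 counts[s] = counts.get(s, 0) + 1
--     lines = ["The winner was {0} with a total of {1} points:".format(winner, score)]
--     for s in sorted(counts, key=lambda x: (len(x), x)):
--         lines.append("- {0}: {1}".format(s, counts[s]))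
--     return "\n".join(lines) + "\n"
-- ===== Notes on version B (the rewrite author's own statement) =====
-- stated objective: faster
-- what changed: B computes both teams' scores arithmetically in one pass (index i contributes len-i points, Kevin's score is the Gauss total minus Stuart's), decides draw/winner from the scores, and only then tallies the winning team's substrings in a dict built in one sweep, instead of materialising both substring lists and rescanning the winning list with .count for every distinct substring.
import Mathlib
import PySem

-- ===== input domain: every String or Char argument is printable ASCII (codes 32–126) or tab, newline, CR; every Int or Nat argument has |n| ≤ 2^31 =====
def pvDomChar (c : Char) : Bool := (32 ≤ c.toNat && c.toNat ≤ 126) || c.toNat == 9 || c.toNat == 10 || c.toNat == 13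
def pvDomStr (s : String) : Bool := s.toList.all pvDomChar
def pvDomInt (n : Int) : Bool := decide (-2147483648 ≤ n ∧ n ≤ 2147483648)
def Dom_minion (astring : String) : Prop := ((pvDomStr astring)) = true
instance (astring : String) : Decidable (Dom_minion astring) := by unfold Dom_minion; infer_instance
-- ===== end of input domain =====

-- B scores both teams arithmetically (index i is worth len-i points) and builds a count dict
-- for the winning team's substrings only, instead of materialising both substring lists and
-- rescanning the winner with .count for every distinct substring (objective: faster, measured).

-- ===== PORT A =====
-- is_vowel(letter): letter is a 1-character string, modelled as a List Char
def pvIsVowelA (letter : List Char) : Bool :=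
  [['a'], ['e'], ['i'], ['o'], ['u']].contains (PySem.Chars.lower letter)

-- the shared tail of A's two winning branches (result/winner fixed, then header + per-substring lines)
def pvOutA (result : List (List Char)) (winner : List Char) : String :=
  String.ofList ((PySem.List.sorted2 (PySem.Set.ofList result) (fun x => x.length) (fun x => x)).foldl
      (fun o s => o ++ ("- ".toList ++ s ++ ": ".toList
        ++ PySem.Int.toChars ((result.count s : Int)) ++ "\n".toList))
      ("The winner was ".toList ++ winner ++ " with a total of ".toList
        ++ PySem.Int.toChars (result.length : Int) ++ " points:\n".toList))

def minion (astring : String) : String :=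
  let cs := astring.toList
  let n : Int := PySem.Chars.len cs
  let sk := (PySem.List.pyRange 0 n).foldl
    (fun (st : List (List Char) × List (List Char)) i =>
      if pvIsVowelA [PySem.List.pyGetD cs i ' '] then
        ((PySem.List.pyRange i n).foldl
            (fun acc j => acc ++ [PySem.List.slice cs (some i) (some (j + 1))]) st.1, st.2)
      else
        (st.1, (PySem.List.pyRange i n).foldl
            (fun acc k => acc ++ [PySem.List.slice cs (some i) (some (k + 1))]) st.2))
    ([], [])
  if sk.1.length > sk.2.length then pvOutA sk.1 "Kevin".toList
  else if sk.1.length < sk.2.length then pvOutA sk.2 "Stuart".toList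
  else "It was a draw!"

-- ===== PORT B =====
-- astring[i].lower() in 'aeiou' — astring[i] has length 1, so this is char membership
def pvIsVowelB (c : Char) : Bool := "aeiou".toList.contains (PySem.Chars.lowerChar c)

def minion_alt (astring : String) : String :=
  let cs := astring.toList
  let n : Int := PySem.Chars.len cs
  let stuart := (PySem.List.pyRange 0 n).foldl
      (fun acc i => if pvIsVowelB (PySem.List.pyGetD cs i ' ') then acc + (n - i) else acc) 0
  let kevin := PySem.Int.floordiv (n * (n + 1)) 2 - stuart
  if stuart = kevin then "It was a draw!"
  else
    let wts : List Char × Bool × Int :=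
      if stuart > kevin then ("Kevin".toList, true, stuart) else ("Stuart".toList, false, kevin)
    let counts := (PySem.List.pyRange 0 n).foldl
      (fun (d : PySem.Dict (List Char) Int) i =>
        if pvIsVowelB (PySem.List.pyGetD cs i ' ') == wts.2.1 then
          (PySem.List.pyRange i n).foldl
            (fun d j =>
              let s := PySem.List.slice cs (some i) (some (j + 1))
              d.insert s (d.getD s 0 + 1)) d
        else d)
      PySem.Dict.empty
    let lines := ["The winner was ".toList ++ wts.1 ++ " with a total of ".toList
        ++ PySem.Int.toChars wts.2.2 ++ " points:".toList]
    let lines := (PySem.List.sorted2 counts.keys (fun x => x.length) (fun x => x)).foldl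
        (fun ls s => ls ++ ["- ".toList ++ s ++ ": ".toList
          ++ PySem.Int.toChars (counts.getD s 0)]) lines
    String.ofList (PySem.Chars.join ['\n'] lines ++ ['\n'])

-- ===== PRECONDITION & SPEC =====
def Spec_minion (astring : String) (out : String) : Prop := out = minion_alt astring
instance (astring : String) (out : String) : Decidable (Spec_minion astring out) := by unfold Spec_minion; infer_instance

-- ===== CLAIM (what is proved, stated in full; the proofs are below) =====
def Claim_equal_minion : Prop := ∀ (astring : String), Dom_minion astring → Spec_minion astring (minion astring)

-- ===== LEMMAS AND PROOFS =====

-- abbreviations used throughout the proofs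
def pvP (cs : List Char) (i : Int) : Bool := pvIsVowelA [PySem.List.pyGetD cs i ' ']
def pvBlk (cs : List Char) (i : Int) : List (List Char) :=
  (PySem.List.pyRange i (cs.length : Int)).map (fun j => PySem.List.slice cs (some i) (some (j + 1)))
def pvIdx (cs : List Char) : List Int := PySem.List.pyRange 0 (cs.length : Int)
def pvIns (d : PySem.Dict (List Char) Int) (s : List Char) : PySem.Dict (List Char) Int :=
  d.insert s (d.getD s 0 + 1)

theorem pv_vowelAB (c : Char) : pvIsVowelB c = pvIsVowelA [c] := by
  simp [pvIsVowelB, pvIsVowelA, PySem.Chars.lower]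

theorem pv_ite_swap {α : Type} (b : Bool) (x y : α) :
    (if b then x else y) = (if !b then y else x) := by cases b <;> rfl

-- A's double loop produces exactly the two flatMaps over filtered indices
theorem pv_flatten_singleton {α β : Type} (f : α → β) (l : List α) :
    (l.map (fun x => [f x])).flatten = l.map f := by
  induction l <;> simp_all

theorem pvA_fold (cs : List Char) :
    (pvIdx cs).foldl
      (fun (st : List (List Char) × List (List Char)) i =>
        if pvIsVowelA [PySem.List.pyGetD cs i ' '] then
          ((PySem.List.pyRange i (cs.length : Int)).foldl
              (fun acc j => acc ++ [PySem.List.slice cs (some i) (some (j + 1))]) st.1, st.2)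
        else
          (st.1, (PySem.List.pyRange i (cs.length : Int)).foldl
              (fun acc k => acc ++ [PySem.List.slice cs (some i) (some (k + 1))]) st.2))
      ([], [])
    = (((pvIdx cs).filter (pvP cs)).flatMap (pvBlk cs),
       ((pvIdx cs).filter (fun i => !pvP cs i)).flatMap (pvBlk cs)) := by
  rw [PySem.List.foldl_congr_mem _ _
      (fun (st : List (List Char) × List (List Char)) i =>
        (if pvP cs i then st.1 ++ pvBlk cs i else st.1,
         if pvP cs i then st.2 else st.2 ++ pvBlk cs i)) _
      (by
        intro st i _
        by_cases h : pvP cs i <;>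
          simp [pvP, pvBlk, pv_flatten_singleton] at h ⊢ <;>
          simp [h])]
  rw [PySem.List.foldl_prod_mk
      (f := fun s i => if pvP cs i then s ++ pvBlk cs i else s)
      (g := fun k i => if pvP cs i then k else k ++ pvBlk cs i)]
  refine Prod.ext ?_ ?_
  · show List.foldl (fun acc i => if pvP cs i then acc ++ pvBlk cs i else acc) [] (pvIdx cs) = _
    rw [PySem.List.foldl_if_eq_foldl_filter (pvP cs) (fun acc i => acc ++ pvBlk cs i),
        PySem.List.foldl_append_eq_flatMap]
    exact List.nil_append _
  · show List.foldl (fun acc i => if pvP cs i then acc else acc ++ pvBlk cs i) [] (pvIdx cs) = _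
    simp only [pv_ite_swap (b := pvP cs _)]
    rw [PySem.List.foldl_if_eq_foldl_filter (fun i => !pvP cs i) (fun acc i => acc ++ pvBlk cs i),
        PySem.List.foldl_append_eq_flatMap]
    exact List.nil_append _

-- a fold over blocks is a fold over their concatenation
theorem pv_foldl_flatMap {α β δ : Type} (g : α → List β) (f : δ → β → δ) (l : List α) (init : δ) :
    l.foldl (fun d a => (g a).foldl f d) init = (l.flatMap g).foldl f init := by
  induction l generalizing init with
  | nil => rfl
  | cons x t ih => simp [List.flatMap_cons, List.foldl_append, ih]

-- join with '\n' plus a trailing '\n' is the concatenation of '\n'-terminated lines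
theorem pv_join_lines (h : List Char) (rest : List (List Char)) :
    PySem.Chars.join ['\n'] (h :: rest) ++ ['\n']
      = (h ++ ['\n']) ++ rest.flatMap (fun x => x ++ ['\n']) := by
  induction rest generalizing h with
  | nil => simp [PySem.Chars.join_singleton]
  | cons x t ih => simp [PySem.Chars.join_cons_cons, ih]

-- Nat-sum of (n-i).toNat casts to the Int-sum of n-i when every i ≤ n
theorem pv_sum_toNat (l : List Int) (n : Int) (h : ∀ i ∈ l, i ≤ n) :
    (((l.map (fun i => (n - i).toNat)).sum : Nat) : Int) = (l.map (fun i => n - i)).sum := by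
  induction l with
  | nil => simp
  | cons x t ih =>
    have hx := h x (by simp)
    have ht := ih (fun i hi => h i (by simp [hi]))
    simp only [List.map_cons, List.sum_cons, Nat.cast_add]
    rw [Int.toNat_of_nonneg (by omega), ht]

-- the length of the flatMap of blocks is the Int score
theorem pv_len_flatMap (cs : List Char) (l : List Int) (h : ∀ i ∈ l, i ≤ (cs.length : Int)) :
    (((l.flatMap (pvBlk cs)).length : Nat) : Int)
      = (l.map (fun i => (cs.length : Int) - i)).sum := by
  rw [List.length_flatMap]
  have hb : ∀ i : Int, (pvBlk cs i).length = ((cs.length : Int) - i).toNat := by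
    intro i; simp [pvBlk, PySem.List.pyRange_one]
  simp only [hb]
  exact pv_sum_toNat l _ h

-- partition of a mapped sum by a Bool predicate
theorem pv_sum_partition (p : Int → Bool) (f : Int → Int) (l : List Int) :
    ((l.filter p).map f).sum + ((l.filter (fun i => !p i)).map f).sum = (l.map f).sum := by
  induction l with
  | nil => simp
  | cons x t ih =>
    by_cases hx : p x
    · rw [List.filter_cons_of_pos (by simp [hx]), List.filter_cons_of_neg (by simp [hx])]
      simp only [List.map_cons, List.sum_cons]
      omega
    · rw [List.filter_cons_of_neg (by simp [hx]), List.filter_cons_of_pos (by simp [hx])]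
      simp only [List.map_cons, List.sum_cons]
      omega

theorem pv_sum_range_int (m : Nat) (a : Int) :
    ((List.range m).map (fun k : Nat => a - (k : Int))).sum * 2 = m * (2 * a - m + 1) := by
  induction m with
  | zero => simp
  | succ m ih =>
    rw [List.range_succ]
    simp only [List.map_append, List.sum_append, List.map_cons, List.map_nil, List.sum_cons,
      List.sum_nil]
    push_cast
    linear_combination ih

-- Gauss: the total score over all indices
theorem pv_gauss (m : Nat) :
    (((PySem.List.pyRange 0 (m : Int)).map (fun i => (m : Int) - i)).sum)
      = PySem.Int.floordiv ((m : Int) * ((m : Int) + 1)) 2 := by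
  rw [PySem.List.pyRange_zero_nat, List.map_map]
  simp only [Function.comp_def]
  rw [eq_comm, PySem.Int.floordiv_eq_iff_of_pos (by norm_num)]
  have h2 := pv_sum_range_int m (m : Int)
  constructor <;> nlinarith [h2]

-- B's counting loop is a single insert-fold over the winning substring list
theorem pv_counts (cs : List Char) (q : Int → Bool) :
    (pvIdx cs).foldl
      (fun (d : PySem.Dict (List Char) Int) i =>
        if q i then
          (PySem.List.pyRange i (cs.length : Int)).foldl
            (fun d j => d.insert (PySem.List.slice cs (some i) (some (j + 1)))
               ((d.getD (PySem.List.slice cs (some i) (some (j + 1))) 0) + 1)) d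
        else d) PySem.Dict.empty
    = (((pvIdx cs).filter q).flatMap (pvBlk cs)).foldl pvIns PySem.Dict.empty := by
  rw [PySem.List.foldl_if_eq_foldl_filter]
  rw [PySem.List.foldl_congr_mem _ _ (fun d i => (pvBlk cs i).foldl pvIns d) _ (by
    intro d i _
    simp only [pvBlk]
    rw [List.foldl_map]
    rfl)]
  rw [pv_foldl_flatMap]

-- the whole non-draw output of A equals B's dict-and-join rendering
theorem pv_branch (L : List (List Char)) (w : List Char) (score : Int)
    (hscore : (L.length : Int) = score) :
    pvOutA L w
      = String.ofList (PySem.Chars.join ['\n']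
          ((PySem.List.sorted2 (L.foldl pvIns PySem.Dict.empty).keys
              (fun x => x.length) (fun x => x)).foldl
            (fun ls s => ls ++ ["- ".toList ++ s ++ ": ".toList
              ++ PySem.Int.toChars ((L.foldl pvIns PySem.Dict.empty).getD s 0)])
            ["The winner was ".toList ++ w ++ " with a total of ".toList
              ++ PySem.Int.toChars score ++ " points:".toList]) ++ ['\n']) := by
  have he : pvIns = fun (d : PySem.Dict (List Char) Int) (s : List Char) =>
      d.insert s (d.getD s 0 + 1) := rfl
  have hk : (L.foldl pvIns PySem.Dict.empty).keys = PySem.Set.ofList L := by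
    rw [he, PySem.Dict.keys_foldl_insert]
    rw [PySem.Set.ofList_eq_foldl]
    simp [PySem.Set.update]
  have hcnt : ∀ s, (L.foldl pvIns PySem.Dict.empty).getD s 0 = (L.count s : Int) := by
    intro s
    rw [he, PySem.Dict.getD_foldl_insert_add_one]
    simp
  unfold pvOutA
  simp only [hk, hcnt]
  rw [PySem.List.foldl_append_singleton_eq_map]
  rw [List.singleton_append]
  rw [pv_join_lines]
  rw [PySem.List.foldl_append_eq_flatMap
      (g := fun s => "- ".toList ++ s ++ ": ".toList
        ++ PySem.Int.toChars ((L.count s : Int)) ++ "\n".toList)]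
  congr 1
  have hnl : "\n".toList = ['\n'] := rfl
  have hpts : " points:\n".toList = " points:".toList ++ ['\n'] := rfl
  simp only [hpts, hnl, hscore]
  simp [List.flatMap_map, List.append_assoc]

-- ===== VERDICT (by name: the statement is the Claim_ definition above) =====
theorem minion_spec : Claim_equal_minion := by
  intro astring _
  unfold Spec_minion minion minion_alt
  dsimp only
  simp only [PySem.Chars.len_eq]
  set cs := astring.toList with hcs
  rw [show PySem.List.pyRange 0 (cs.length : Int) = pvIdx cs from rfl]
  have hp : ∀ i : Int, pvIsVowelB (PySem.List.pyGetD cs i ' ') = pvP cs i := fun i => by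
    rw [pv_vowelAB]; rfl
  simp only [hp]
  rw [pvA_fold cs]
  rw [PySem.List.foldl_if_eq_foldl_filter (pvP cs)
      (fun acc i => acc + ((cs.length : Int) - i))]
  rw [PySem.List.foldl_add]
  rw [zero_add]
  set S := (pvIdx cs).filter (pvP cs) with hS
  set K := (pvIdx cs).filter (fun i => !pvP cs i) with hK
  have hmem : ∀ i ∈ pvIdx cs, 0 ≤ i ∧ i < (cs.length : Int) := by
    intro i hi
    exact PySem.List.mem_pyRange_one.mp hi
  have hlenS : (((S.flatMap (pvBlk cs)).length : Nat) : Int)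
      = (S.map (fun i => (cs.length : Int) - i)).sum :=
    pv_len_flatMap cs S (fun i hi => le_of_lt (hmem i (List.mem_of_mem_filter hi)).2)
  have hlenK : (((K.flatMap (pvBlk cs)).length : Nat) : Int)
      = (K.map (fun i => (cs.length : Int) - i)).sum :=
    pv_len_flatMap cs K (fun i hi => le_of_lt (hmem i (List.mem_of_mem_filter hi)).2)
  have htot : (S.map (fun i => (cs.length : Int) - i)).sum
      + (K.map (fun i => (cs.length : Int) - i)).sum
      = PySem.Int.floordiv ((cs.length : Int) * ((cs.length : Int) + 1)) 2 := by
    rw [hS, hK, pv_sum_partition (pvP cs) (fun i => (cs.length : Int) - i)]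
    exact pv_gauss cs.length
  rw [← htot, ← hlenS, ← hlenK]
  set a := (S.flatMap (pvBlk cs)).length with ha
  set b := (K.flatMap (pvBlk cs)).length with hb
  rcases Nat.lt_trichotomy a b with h | h | h
  · -- Kevin's list is longer: winner label "Stuart", result = kevin list
    rw [if_neg (by omega), if_pos (by omega)]
    rw [if_neg (by
      intro hEq
      have : (a : Int) = (b : Int) := by linarith [hEq]
      omega)]
    rw [if_neg (by
      intro hGt
      have : ((b : Int) : Int) < (a : Int) := by linarith [hGt]
      omega)]
    dsimp only
    have hbf : ∀ b : Bool, (b == false) = !b := by decide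
    simp only [hbf]
    rw [pv_counts cs (fun i => !pvP cs i)]
    rw [← hK]
    exact pv_branch (K.flatMap (pvBlk cs)) "Stuart".toList _ (by ring)
  · -- draw
    rw [if_neg (by omega), if_neg (by omega)]
    rw [if_pos (by rw [h]; ring)]
  · -- Stuart's list is longer: winner label "Kevin", result = stuart list
    rw [if_pos (by omega)]
    rw [if_neg (by
      intro hEq
      have : (a : Int) = (b : Int) := by linarith [hEq]
      omega)]
    rw [if_pos (by
      show ((a : Int) + (b : Int)) - (a : Int) < (a : Int)
      omega)]
    dsimp only
    have hbt : ∀ b : Bool, (b == true) = b := by decide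
    simp only [hbt]
    rw [pv_counts cs (pvP cs)]
    rw [← hS]
    exact pv_branch (S.flatMap (pvBlk cs)) "Kevin".toList _ rfl
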